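-- pv_equiv track=rewrite | github.com/vinchinzu/euler | python/326.py | compute_a_sequence
-- ===== SOURCE A (Python) =====
-- from typing import Dict, Iterable, List, Sequence, Tuple
--
-- def compute_a_sequence(limit: int) -> List[int]:
--     """Compute the sequence a_n up to index ``limit`` (1-based, index 0 unused).
--
--     a_1 = 1
--     a_n = (sum_{k=1}^{n-1} k * a_k) mod n
--     """
--
--     if limit < 1:
--         return []
--
--     a: List[int] = [0] * (limit + 1)
--     a[1] = 1
--     running_weighted_sum = 0
--
--     for n in range(2, limit + 1):
--         running_weighted_sum += (n - 1) * a[n - 1]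
--         a[n] = running_weighted_sum % n
--
--     return a
-- ===== SOURCE B (Python) =====
-- def compute_a_sequence(limit: int):
--     """Compute the sequence a_n up to index limit (1-based, index 0 unused).
--
--     Closed form: a_n depends only on the quotient and remainder of n by six,
--     so each term is computed directly with no recurrence and no running state.
--     """
--     if limit < 1:
--         return []
--
--     def cf(n):
--         t, r = divmod(n, 6)
--         if r == 0:
--             return 3 * t
--         if r == 1:
--             return 4 * t + 1
--         if r == 2:
--             return 3 * t + 1
--         if r == 3:
--             return t
--         if r == 4:
--             return 6 * t + 3
--         return t
--
--     return [0] + [cf(n) for n in range(1, limit + 1)]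
-- ===== Notes on version B (the rewrite author's own statement) =====
-- stated objective: alternative
-- what changed: Replaces the sequential recurrence (array writes plus a running weighted-sum accumulator) with a per-index closed form: each a_n is computed directly from the quotient and remainder of n by six, so no state flows between iterations; correctness rests on the proved polynomial closed form of the weighted partial sums.
import Mathlib
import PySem

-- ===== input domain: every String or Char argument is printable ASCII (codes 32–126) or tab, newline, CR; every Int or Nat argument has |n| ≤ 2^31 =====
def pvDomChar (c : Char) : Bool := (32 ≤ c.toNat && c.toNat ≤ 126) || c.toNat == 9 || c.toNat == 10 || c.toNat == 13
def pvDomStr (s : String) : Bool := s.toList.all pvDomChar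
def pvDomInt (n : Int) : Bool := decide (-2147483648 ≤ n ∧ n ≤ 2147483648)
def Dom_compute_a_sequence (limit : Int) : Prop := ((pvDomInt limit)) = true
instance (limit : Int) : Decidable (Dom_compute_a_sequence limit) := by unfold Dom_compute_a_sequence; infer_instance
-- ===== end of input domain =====

-- B replaces A's sequential recurrence with a stateless per-index closed form in the quotient and remainder of n by six (alternative algorithm; return value only).

-- ===== PORT A =====
-- loop body of A: update the running weighted sum from a[n-1], then store its mod at index n
def stepA (st : List Int × Int) (n : Int) : List Int × Int :=
  let rws := st.2 + (n - 1) * PySem.List.pyGetD st.1 (n - 1) 0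
  (PySem.List.pySetD st.1 n (PySem.Int.mod rws n), rws)

def compute_a_sequence (limit : Int) : List Int :=
  if limit < 1 then []
  else
    let a : List Int := List.replicate (limit + 1).toNat 0
    let a := PySem.List.pySetD a 1 1
    ((PySem.List.pyRange 2 (limit + 1) 1).foldl stepA (a, 0)).1

-- ===== PORT B =====
-- closed form of a_n: t, r = divmod(n, 6), then a case per residue r
def cfB (n : Int) : Int :=
  let t := PySem.Int.floordiv n 6
  let r := PySem.Int.mod n 6
  if r = 0 then 3 * t
  else if r = 1 then 4 * t + 1
  else if r = 2 then 3 * t + 1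
  else if r = 3 then t
  else if r = 4 then 6 * t + 3
  else t

def compute_a_sequence_alt (limit : Int) : List Int :=
  if limit < 1 then []
  else [0] ++ (PySem.List.pyRange 1 (limit + 1) 1).map cfB

-- ===== PRECONDITION & SPEC =====
def Spec_compute_a_sequence (limit : Int) (out : List Int) : Prop := out = compute_a_sequence_alt limit
instance (limit : Int) (out : List Int) : Decidable (Spec_compute_a_sequence limit out) := by unfold Spec_compute_a_sequence; infer_instance

-- ===== CLAIM (what is proved, stated in full; the proofs are below) =====
def Claim_equal_compute_a_sequence : Prop := ∀ (limit : Int), Dom_compute_a_sequence limit → Spec_compute_a_sequence limit (compute_a_sequence limit)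

-- ===== LEMMAS AND PROOFS =====

-- closed form of the weighted partial sum S_n = sum_{k<=n} k*a_k, per residue of n mod 6
def Sf (n : Int) : Int :=
  let t := PySem.Int.floordiv n 6
  let r := PySem.Int.mod n 6
  if r = 0 then 36*t^3 - 3*t
  else if r = 1 then 36*t^3 + 24*t^2 + 7*t + 1
  else if r = 2 then 36*t^3 + 42*t^2 + 19*t + 3
  else if r = 3 then 36*t^3 + 48*t^2 + 22*t + 3
  else if r = 4 then 36*t^3 + 84*t^2 + 64*t + 15
  else 36*t^3 + 90*t^2 + 69*t + 15

lemma divmod6 (t r : Int) (h0 : 0 ≤ r) (h6 : r < 6) :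
    PySem.Int.floordiv (6*t + r) 6 = t ∧ PySem.Int.mod (6*t + r) 6 = r := by
  have hq : PySem.Int.floordiv (6*t + r) 6 = t :=
    (PySem.Int.floordiv_eq_iff_of_pos (by omega)).mpr ⟨by omega, by omega⟩
  refine ⟨hq, ?_⟩
  have := PySem.Int.floordiv_mul_add_mod (6*t + r) 6
  rw [hq] at this; omega

-- the recurrence step of A's accumulator on the closed forms: S_n = S_{n-1} + n * a_n
lemma Sf_step (n : Int) (h : 1 ≤ n) : Sf n = Sf (n - 1) + n * cfB n := by
  obtain ⟨t, r, hr0, hr6, rfl⟩ :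
      ∃ t r : Int, 0 ≤ r ∧ r < 6 ∧ n = 6*t + r :=
    ⟨PySem.Int.floordiv n 6, PySem.Int.mod n 6, PySem.Int.mod_nonneg _ (by omega),
      PySem.Int.mod_lt _ (by omega), by
        have := PySem.Int.floordiv_mul_add_mod n 6; omega⟩
  have ht : 0 ≤ t := by omega
  interval_cases r
  · have h1 := divmod6 t 0 (by omega) (by omega)
    have h2 := divmod6 (t-1) 5 (by omega) (by omega)
    rw [show (6*t + 0 - 1 : Int) = 6*(t-1) + 5 from by ring]
    rw [show (6*t + 0 : Int) = 6*t from by ring] at h1 ⊢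
    simp only [Sf, cfB, h1.1, h1.2, h2.1, h2.2]
    norm_num; ring
  · have h1 := divmod6 t 1 (by omega) (by omega)
    have h2 := divmod6 t 0 (by omega) (by omega)
    rw [show (6*t + 1 - 1 : Int) = 6*t + 0 from by ring]
    simp only [Sf, cfB, h1.1, h1.2, h2.1, h2.2]
    norm_num; ring
  · have h1 := divmod6 t 2 (by omega) (by omega)
    have h2 := divmod6 t 1 (by omega) (by omega)
    rw [show (6*t + 2 - 1 : Int) = 6*t + 1 from by ring]
    simp only [Sf, cfB, h1.1, h1.2, h2.1, h2.2]
    norm_num; ring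
  · have h1 := divmod6 t 3 (by omega) (by omega)
    have h2 := divmod6 t 2 (by omega) (by omega)
    rw [show (6*t + 3 - 1 : Int) = 6*t + 2 from by ring]
    simp only [Sf, cfB, h1.1, h1.2, h2.1, h2.2]
    norm_num; ring
  · have h1 := divmod6 t 4 (by omega) (by omega)
    have h2 := divmod6 t 3 (by omega) (by omega)
    rw [show (6*t + 4 - 1 : Int) = 6*t + 3 from by ring]
    simp only [Sf, cfB, h1.1, h1.2, h2.1, h2.2]
    norm_num; ring
  · have h1 := divmod6 t 5 (by omega) (by omega)
    have h2 := divmod6 t 4 (by omega) (by omega)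
    rw [show (6*t + 5 - 1 : Int) = 6*t + 4 from by ring]
    simp only [Sf, cfB, h1.1, h1.2, h2.1, h2.2]
    norm_num; ring

-- reduce "c + n*q mod n" to c when 0 ≤ c < n
lemma mod_of_decomp (S n c q : Int) (hn : 0 < n) (hd : S = c + n * q)
    (hc0 : 0 ≤ c) (hcn : c < n) : PySem.Int.mod S n = c := by
  rw [PySem.Int.mod_eq_emod_of_pos hn, hd, show c + n * q = c + q * n from by ring]
  simp [Int.add_mul_emod_self_right, Int.emod_eq_of_lt hc0 hcn]

-- the key fact: A's stored value S_{n-1} mod n IS the closed form a_n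
lemma Sf_mod (n : Int) (h : 2 ≤ n) : PySem.Int.mod (Sf (n - 1)) n = cfB n := by
  obtain ⟨t, r, hr0, hr6, rfl⟩ :
      ∃ t r : Int, 0 ≤ r ∧ r < 6 ∧ n = 6*t + r :=
    ⟨PySem.Int.floordiv n 6, PySem.Int.mod n 6, PySem.Int.mod_nonneg _ (by omega),
      PySem.Int.mod_lt _ (by omega), by
        have := PySem.Int.floordiv_mul_add_mod n 6; omega⟩
  have ht : 0 ≤ t := by omega
  interval_cases r
  · have h1 := divmod6 t 0 (by omega) (by omega)
    have h2 := divmod6 (t-1) 5 (by omega) (by omega)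
    rw [show (6*t + 0 - 1 : Int) = 6*(t-1) + 5 from by ring]
    rw [show (6*t + 0 : Int) = 6*t from by ring] at h1 ⊢
    simp only [Sf, cfB, h1.1, h1.2, h2.1, h2.2]
    norm_num
    exact mod_of_decomp _ _ _ (6*t^2 - 3*t - 1) (by omega) (by ring) (by omega) (by omega)
  · have h1 := divmod6 t 1 (by omega) (by omega)
    have h2 := divmod6 t 0 (by omega) (by omega)
    rw [show (6*t + 1 - 1 : Int) = 6*t + 0 from by ring]
    simp only [Sf, cfB, h1.1, h1.2, h2.1, h2.2]
    norm_num
    exact mod_of_decomp _ _ _ (6*t^2 - t - 1) (by omega) (by ring) (by omega) (by omega)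
  · have h1 := divmod6 t 2 (by omega) (by omega)
    have h2 := divmod6 t 1 (by omega) (by omega)
    rw [show (6*t + 2 - 1 : Int) = 6*t + 1 from by ring]
    simp only [Sf, cfB, h1.1, h1.2, h2.1, h2.2]
    norm_num
    exact mod_of_decomp _ _ _ (6*t^2 + 2*t) (by omega) (by ring) (by omega) (by omega)
  · have h1 := divmod6 t 3 (by omega) (by omega)
    have h2 := divmod6 t 2 (by omega) (by omega)
    rw [show (6*t + 3 - 1 : Int) = 6*t + 2 from by ring]
    simp only [Sf, cfB, h1.1, h1.2, h2.1, h2.2]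
    norm_num
    exact mod_of_decomp _ _ _ (6*t^2 + 4*t + 1) (by omega) (by ring) (by omega) (by omega)
  · have h1 := divmod6 t 4 (by omega) (by omega)
    have h2 := divmod6 t 3 (by omega) (by omega)
    rw [show (6*t + 4 - 1 : Int) = 6*t + 3 from by ring]
    simp only [Sf, cfB, h1.1, h1.2, h2.1, h2.2]
    norm_num
    exact mod_of_decomp _ _ _ (6*t^2 + 4*t) (by omega) (by ring) (by omega) (by omega)
  · have h1 := divmod6 t 5 (by omega) (by omega)
    have h2 := divmod6 t 4 (by omega) (by omega)
    rw [show (6*t + 5 - 1 : Int) = 6*t + 4 from by ring]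
    simp only [Sf, cfB, h1.1, h1.2, h2.1, h2.2]
    norm_num
    exact mod_of_decomp _ _ _ (6*t^2 + 9*t + 3) (by omega) (by ring) (by omega) (by omega)

-- loop invariant: after processing n = 2..1+j, A's array is the closed-form prefix
-- padded with zeros and A's accumulator is the closed-form partial sum Sf j
lemma loop_inv (limit : Int) (h : 1 ≤ limit) (j : Nat) (hj : (j : Int) ≤ limit - 1) :
    (PySem.List.pyRange 2 (2 + (j : Int)) 1).foldl stepA
        (PySem.List.pySetD (List.replicate (limit + 1).toNat (0 : Int)) 1 1, 0)
      = ((PySem.List.pyRange 0 (2 + (j : Int)) 1).map cfB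
          ++ List.replicate ((limit + 1).toNat - (j + 2)) 0, Sf (j : Int)) := by
  induction j with
  | zero =>
      have hL : ∃ m : Nat, (limit + 1).toNat = m + 2 := ⟨(limit - 1).toNat, by omega⟩
      obtain ⟨m, hm⟩ := hL
      simp only [Nat.cast_zero, add_zero, PySem.List.pyRange_one_eq_nil (by omega : (2:Int) ≤ 2),
        List.foldl_nil, hm]
      rw [PySem.List.pySetD_of_nonneg (h := by omega)]
      refine Prod.ext ?_ (by exact (by decide : (0 : Int) = Sf 0))
      rw [show PySem.List.pyRange 0 2 1 = [0, 1] from by decide,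
        show List.map cfB [0, 1] = [0, 1] from by decide]
      simp [List.replicate_succ]
  | succ j ih =>
      have hj' : (j : Int) ≤ limit - 1 := by push_cast at hj ⊢; omega
      have ih' := ih hj'
      have hsplit : PySem.List.pyRange 2 (2 + ((j + 1 : Nat) : Int)) 1
          = PySem.List.pyRange 2 (2 + (j : Int)) 1 ++ [2 + (j : Int)] := by
        rw [show (2 + ((j + 1 : Nat) : Int)) = (2 + (j : Int)) + 1 from by push_cast; ring,
          PySem.List.pyRange_one_succ_right (by omega)]
      rw [hsplit]
      simp only [List.foldl_append, List.foldl_cons, List.foldl_nil, ih']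
      set L := (PySem.List.pyRange 0 (2 + (j : Int)) 1).map cfB with hL
      have hLlen : L.length = j + 2 := by
        rw [hL, List.length_map, PySem.List.length_pyRange_one]
        omega
      -- the value A reads: a[(2+j)-1] = cfB (1+j)
      have hread : PySem.List.pyGetD (L ++ List.replicate ((limit + 1).toNat - (j + 2)) 0)
          (2 + (j : Int) - 1) 0 = cfB ((j : Int) + 1) := by
        have hcast : L = (PySem.List.pyRange 0 (((j + 2 : Nat)) : Int) 1).map cfB := by
          rw [hL]; congr 2; push_cast; ring
        have hmr := PySem.List.pyGetD_map_pyRange cfB (j + 2) (j + 1) 0 (by omega)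
        rw [show (2 + (j : Int) - 1) = (((j + 1 : Nat)) : Int) from by push_cast; ring,
          PySem.List.pyGetD_natCast, List.getD_append _ _ _ _ (by omega), hcast,
          ← PySem.List.pyGetD_natCast, hmr]
        push_cast; ring_nf
      -- A's updated accumulator is the next closed-form partial sum
      have hrws : Sf (j : Int) + (2 + (j : Int) - 1)
            * PySem.List.pyGetD (L ++ List.replicate ((limit + 1).toNat - (j + 2)) 0)
                (2 + (j : Int) - 1) 0
          = Sf ((j : Int) + 1) := by
        rw [hread, Sf_step ((j : Int) + 1) (by omega),
          show ((j : Int) + 1 - 1) = (j : Int) from by ring]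
        ring
      -- the write lands on the first padding zero and extends the closed-form prefix
      have hpad : (limit + 1).toNat - (j + 2) = ((limit + 1).toNat - (j + 3)) + 1 := by
        push_cast at hj; omega
      unfold stepA
      simp only [hrws]
      rw [show PySem.Int.mod (Sf ((j : Int) + 1)) (2 + (j : Int)) = cfB (2 + (j : Int)) from by
        have hm := Sf_mod (2 + (j : Int)) (by omega)
        rw [show (2 + (j : Int) - 1) = (j : Int) + 1 from by ring] at hm
        exact hm]
      refine Prod.ext ?_ (by norm_cast)
      simp only
      rw [hpad, List.replicate_succ,
        PySem.List.pySetD_of_nonneg (h := by omega),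
        show (2 + (j : Int)).toNat = L.length + 0 from by omega,
        List.set_append_right _ _ (by omega)]
      simp only [Nat.add_zero, Nat.sub_self, List.set_cons_zero]
      rw [show (L ++ (cfB (2 + (j : Int)) :: List.replicate ((limit + 1).toNat - (j + 3)) 0))
            = (L ++ [cfB (2 + (j : Int))]) ++ List.replicate ((limit + 1).toNat - (j + 3)) 0
          from by simp]
      congr 1
      rw [hL, show (2 + ((j + 1 : Nat) : Int)) = (2 + (j : Int)) + 1 from by push_cast; ring,
        PySem.List.pyRange_one_succ_right (by omega), List.map_append, List.map_cons,
        List.map_nil]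

-- ===== VERDICT (by name: the statement is the Claim_ definition above) =====
theorem compute_a_sequence_spec : Claim_equal_compute_a_sequence := by
  intro limit _
  unfold Spec_compute_a_sequence compute_a_sequence compute_a_sequence_alt
  by_cases hl : limit < 1
  · simp [hl]
  · have h1 : 1 ≤ limit := by omega
    have hj : (((limit - 1).toNat : Nat) : Int) ≤ limit - 1 := by omega
    have h2 : limit + 1 = 2 + (((limit - 1).toNat : Nat) : Int) := by omega
    simp only [hl, if_false]
    have hinv := congrArg Prod.fst (loop_inv limit h1 (limit - 1).toNat hj)
    simp only at hinv
    rw [show PySem.List.pyRange 2 (limit + 1) 1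
        = PySem.List.pyRange 2 (2 + (((limit - 1).toNat : Nat) : Int)) 1 from by rw [← h2],
      hinv, show (limit + 1).toNat - ((limit - 1).toNat + 2) = 0 from by omega]
    rw [← h2, PySem.List.pyRange_one_cons (by omega : (0:Int) < limit + 1), List.map_cons]
    simp [show cfB 0 = 0 from by decide]
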